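-- pv_equiv track=rewrite | github.com/yodeai/yodeai-server | utils.py | addHyperlinksToResponse
-- ===== SOURCE A (Python) =====
-- def addHyperlinksToResponse(response, linkMap):
--     keyList = list(linkMap.keys())
--     keyList.sort(key=lambda a: len(a))
--     newResponse = response
--     i = 0
--     while i < len(newResponse):
--         for key in keyList:
--             if newResponse[i:].startswith(key):
--                 href = f"[{key}]({linkMap[key]})"
--                 newResponse = f"{newResponse[0: i]}{href}{newResponse[i + len(key):]}"
--                 i += len(href) - 1
--                 break
--         i += 1
--     return newResponse
-- ===== SOURCE B (Python) =====
-- def addHyperlinksToResponse(response, linkMap):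
--     # Single pass over the original string with an output buffer: no string
--     # rebuilding, no slice copies (startswith with an offset), join once.
--     keys = sorted(linkMap.keys(), key=len)
--     out = []
--     i = 0
--     n = len(response)
--     while i < n:
--         for key in keys:
--             if response.startswith(key, i):
--                 out.append(f"[{key}]({linkMap[key]})")
--                 i += len(key)
--                 break
--         else:
--             out.append(response[i])
--             i += 1
--     return "".join(out)
-- ===== Notes on version B (the rewrite author's own statement) =====
-- stated objective: faster
-- what changed: Instead of repeatedly rebuilding the whole string (and copying the suffix newResponse[i:] at every position), B scans the original string once with an offset startswith and appends pieces to a buffer joined at the end.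
import Mathlib
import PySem

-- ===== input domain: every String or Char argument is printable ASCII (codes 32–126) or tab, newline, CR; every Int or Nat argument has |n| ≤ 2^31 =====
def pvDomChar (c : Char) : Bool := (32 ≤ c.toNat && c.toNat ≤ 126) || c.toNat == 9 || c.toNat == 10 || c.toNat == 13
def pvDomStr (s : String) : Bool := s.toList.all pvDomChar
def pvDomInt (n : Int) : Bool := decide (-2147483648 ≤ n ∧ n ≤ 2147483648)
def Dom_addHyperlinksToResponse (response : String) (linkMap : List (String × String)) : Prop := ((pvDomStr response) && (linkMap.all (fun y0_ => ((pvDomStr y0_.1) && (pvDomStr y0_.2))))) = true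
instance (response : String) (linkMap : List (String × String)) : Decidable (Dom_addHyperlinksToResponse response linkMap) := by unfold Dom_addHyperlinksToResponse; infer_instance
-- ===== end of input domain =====

-- B replaces A's per-position suffix copies and whole-string rebuilds by a single
-- pass over the original string with an output buffer; measurably faster.


-- shared by both pythons: keyList = list(linkMap.keys()) sorted (stably) by length
def pvKeyList (linkMap : List (String × String)) : List String :=
  PySem.List.sorted (PySem.Dict.keys (PySem.Dict.ofList linkMap)) (fun a => a.length) false

-- f"[{key}]({linkMap[key]})" over List Char (key present in the dict, so getD's default is never used)
def pvHref (d : PySem.Dict String String) (k : String) : List Char :=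
  ['['] ++ k.toList ++ [']', '('] ++ (PySem.Dict.getD d k "").toList ++ [')']

-- ===== PORT A =====
-- A's while loop over the (growing) newResponse with index i.  The loop is made
-- total with fuel |response|+1, which never runs out when every key is nonempty
-- (each iteration then strictly shrinks |newResponse| - i); with an empty key the
-- Python loops forever and the fuel cuts both ports off identically.
def aGo (ks : List String) (d : PySem.Dict String String) :
    Nat → List Char → Nat → List Char
  | 0, s, _ => s
  | f + 1, s, i =>
    if i < s.length then
      match ks.find? (fun k => k.toList.isPrefixOf (s.drop i)) with
      | some k =>
          let href := pvHref d k
          aGo ks d f (s.take i ++ href ++ s.drop (i + k.toList.length))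
            ((i + (href.length - 1)) + 1)
      | none => aGo ks d f s (i + 1)
    else s

def addHyperlinksToResponse (response : String) (linkMap : List (String × String)) : String :=
  String.mk (aGo (pvKeyList linkMap) (PySem.Dict.ofList linkMap)
    (response.toList.length + 1) response.toList 0)

-- ===== PORT B =====
-- B's single pass: out is the buffer (pieces joined as we go), rest the unread
-- suffix of the original response.  Same fuel device, same bound.
def altGo (ks : List String) (d : PySem.Dict String String) :
    Nat → List Char → List Char → List Char
  | 0, out, rest => out ++ rest
  | f + 1, out, rest =>
    match rest with
    | [] => out
    | c :: rs =>
      match ks.find? (fun k => k.toList.isPrefixOf (c :: rs)) with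
      | some k => altGo ks d f (out ++ pvHref d k) ((c :: rs).drop k.toList.length)
      | none => altGo ks d f (out ++ [c]) rs

def addHyperlinksToResponse_alt (response : String) (linkMap : List (String × String)) : String :=
  String.mk (altGo (pvKeyList linkMap) (PySem.Dict.ofList linkMap)
    (response.toList.length + 1) [] response.toList)

-- ===== PRECONDITION & SPEC =====
def Spec_addHyperlinksToResponse (response : String) (linkMap : List (String × String)) (out : String) : Prop := out = addHyperlinksToResponse_alt response linkMap
instance (response : String) (linkMap : List (String × String)) (out : String) : Decidable (Spec_addHyperlinksToResponse response linkMap out) := by unfold Spec_addHyperlinksToResponse; infer_instance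

-- ===== CLAIM (what is proved, stated in full; the proofs are below) =====
def Claim_equal_addHyperlinksToResponse : Prop := ∀ (response : String) (linkMap : List (String × String)), Dom_addHyperlinksToResponse response linkMap → Spec_addHyperlinksToResponse response linkMap (addHyperlinksToResponse response linkMap)

-- ===== LEMMAS AND PROOFS =====

lemma pvHref_length_pos (d : PySem.Dict String String) (k : String) :
    0 < (pvHref d k).length := by
  simp [pvHref]

-- The loop correspondence: A's state (out ++ rest, |out|) matches B's (out, rest).
lemma go_eq (ks : List String) (d : PySem.Dict String String) :
    ∀ (f : Nat) (out rest : List Char),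
      aGo ks d f (out ++ rest) out.length = altGo ks d f out rest := by
  intro f
  induction f with
  | zero => intro out rest; rfl
  | succ f ih =>
    intro out rest
    cases rest with
    | nil => simp [aGo, altGo]
    | cons c rs =>
      have hlt : out.length < (out ++ c :: rs).length := by
        simp
      have hdrop : (out ++ c :: rs).drop out.length = c :: rs :=
        List.drop_left ..
      rw [aGo, if_pos hlt, hdrop, altGo]
      cases hfind : ks.find? (fun k => k.toList.isPrefixOf (c :: rs)) with
      | none =>
        have : out ++ c :: rs = (out ++ [c]) ++ rs := by simp
        rw [this]
        have hl : out.length + 1 = (out ++ [c]).length := by simp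
        rw [hl, ih (out ++ [c]) rs]
      | some k =>
        have htake : (out ++ c :: rs).take out.length = out := List.take_left ..
        have hdrop2 : (out ++ c :: rs).drop (out.length + k.toList.length)
            = (c :: rs).drop k.toList.length := by
          rw [← List.drop_drop, hdrop]
        have hi : (out.length + ((pvHref d k).length - 1)) + 1
            = (out ++ pvHref d k).length := by
          have := pvHref_length_pos d k
          simp only [List.length_append]
          omega
        simp only [htake, hdrop2, hi]
        exact ih (out ++ pvHref d k) ((c :: rs).drop k.toList.length)

-- ===== VERDICT (by name: the statement is the Claim_ definition above) =====
theorem addHyperlinksToResponse_spec : Claim_equal_addHyperlinksToResponse := by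
  intro response linkMap _
  unfold Spec_addHyperlinksToResponse addHyperlinksToResponse addHyperlinksToResponse_alt
  have h := go_eq (pvKeyList linkMap) (PySem.Dict.ofList linkMap)
    (response.toList.length + 1) [] response.toList
  simpa using congrArg String.mk h
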